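-- pv_equiv track=rewrite | github.com/Heng1222/Ohsumed_classification | MeSH_data/create_dataset.py | get_lcs_path_and_depth
-- ===== SOURCE A (Python) =====
-- def get_depth(tree_number):
--     """根據使用者規則計算'C'類別下的節點深度。"""
--     # 規則: C=1, C01=2, C01.123=3
--     if not tree_number:
--         return 0
--
--     if not tree_number.startswith('C'):
--         return tree_number.count('.') + 1 # For non-'C' categories
--
--     if '.' not in tree_number:
--         # C -> 1, C01 -> 2
--         return 1 if tree_number == 'C' else 2
--     else:
--         # C01.123 -> count('.') is 1 -> 1 + 2 = 3
--         return tree_number.count('.') + 2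
--
-- def get_lcs_path_and_depth(tn1, tn2):
--     """找到兩個樹狀編號的最低共同上層 (LCS) 的路徑和深度。"""
--     path1 = get_path_components(tn1)
--     path2 = get_path_components(tn2)
--
--     lcs_tn_components = []
--     min_len = min(len(path1), len(path2))
--     for i in range(min_len):
--         if path1[i] == path2[i]:
--             lcs_tn_components.append(path1[i])
--         else:
--             break
--
--     if not lcs_tn_components:
--         # 如果沒有共同路徑，且兩者都是疾病，則 LCS 為根節點 'C'
--         if tn1.startswith('C') and tn2.startswith('C'):
--             return 'C', 1
--         return "", 0
--
--     lcs_tree_number = lcs_tn_components[-1]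
--     lcs_depth = get_depth(lcs_tree_number)
--     return lcs_tree_number, lcs_depth
--
-- def get_path_components(tree_number):
--     """返回祖先樹狀編號組件的列表。"""
--     if not tree_number:
--         return []
--
--     path = []
--     # 加入根節點 C
--     if tree_number.startswith('C') and tree_number != 'C':
--         path.append('C')
--
--     parts = tree_number.split('.')
--     current_path_parts = []
--     for part in parts:
--         current_path_parts.append(part)
--         path.append(".".join(current_path_parts))
--     # 找 tree_number 往上所有父節點的唯一路徑
--     unique_path = []
--     for p in path:
--         if p not in unique_path:
--             unique_path.append(p)
--     return unique_path
-- ===== SOURCE B (Python) =====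
-- def get_depth(tree_number):
--     """根據使用者規則計算'C'類別下的節點深度。"""
--     if not tree_number:
--         return 0
--     if not tree_number.startswith('C'):
--         return tree_number.count('.') + 1
--     if '.' not in tree_number:
--         return 1 if tree_number == 'C' else 2
--     else:
--         return tree_number.count('.') + 2
--
-- def get_lcs_path_and_depth(tn1, tn2):
--     """LCS path/depth computed directly on the dot-separated parts: no ancestor
--     lists are built; the common leading parts are joined back into the LCS."""
--     common = []
--     for x, y in zip(tn1.split('.'), tn2.split('.')):
--         if x != y:
--             break
--         common.append(x)
--     if not common:
--         if tn1.startswith('C') and tn2.startswith('C'):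
--             return 'C', 1
--         return "", 0
--     lcs = '.'.join(common)
--     return lcs, get_depth(lcs)
-- ===== Notes on version B (the rewrite author's own statement) =====
-- stated objective: simpler
-- what changed: B computes the common leading dot-separated parts of the two tree numbers directly and joins them back into the LCS, instead of building, deduplicating and index-scanning explicit ancestor-string lists for both inputs.
import Mathlib
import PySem

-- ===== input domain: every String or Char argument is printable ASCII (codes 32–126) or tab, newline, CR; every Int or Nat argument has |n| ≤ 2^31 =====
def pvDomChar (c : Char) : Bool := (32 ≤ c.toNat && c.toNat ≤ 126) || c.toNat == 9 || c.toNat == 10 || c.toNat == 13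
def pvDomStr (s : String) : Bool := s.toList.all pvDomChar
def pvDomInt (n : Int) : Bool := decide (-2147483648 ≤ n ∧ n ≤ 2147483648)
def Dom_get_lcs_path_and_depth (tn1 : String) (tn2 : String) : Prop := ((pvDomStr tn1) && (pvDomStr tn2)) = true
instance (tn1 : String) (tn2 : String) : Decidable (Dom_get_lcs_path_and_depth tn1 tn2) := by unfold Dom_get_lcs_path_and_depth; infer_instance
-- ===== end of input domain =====

-- B computes the LCS directly on the dot-separated parts (common leading parts, joined back)
-- instead of building, deduplicating and scanning explicit ancestor-string lists; objective: simpler.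

-- ===== PORT A =====

-- get_depth (helper, textually identical in Source A and Source B, shared by both ports)
def pyGetDepth (tn : String) : Int :=
  if tn = "" then 0
  else if ¬ (PySem.Str.startswith tn "C" = true) then (PySem.Str.count tn "." : Int) + 1
  else if ¬ (PySem.Str.isIn "." tn = true) then (if tn = "C" then 1 else 2)
  else (PySem.Str.count tn "." : Int) + 2

-- tn.split('.') — separator "." ≠ "", so Python's split always returns (split? = some of this)
def pySplitDot (tn : String) : List String :=
  (PySem.Chars.splitOn tn.toList ['.']).map String.ofList

-- get_path_components: root 'C', cumulative '.'-joins, then the order-preserving dedup loop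
def get_path_components (tn : String) : List String :=
  if tn = "" then []
  else
    let path0 : List String :=
      if PySem.Str.startswith tn "C" = true ∧ tn ≠ "C" then ["C"] else []
    let parts := pySplitDot tn
    let built := parts.foldl
      (fun (st : List String × List String) part =>
        let cur := st.2 ++ [part]
        (st.1 ++ [PySem.Str.join "." cur], cur))
      (path0, ([] : List String))
    built.1.foldl (fun u p => if p ∈ u then u else u ++ [p]) []

-- for i in range(min_len): if path1[i] == path2[i]: append else break
def lcsComponents : List String → List String → List String
  | a :: as, b :: bs => if a = b then a :: lcsComponents as bs else []
  | _, _ => []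

def get_lcs_path_and_depth (tn1 : String) (tn2 : String) : String × Int :=
  let path1 := get_path_components tn1
  let path2 := get_path_components tn2
  match lcsComponents path1 path2 with
  | [] =>
    if PySem.Str.startswith tn1 "C" = true ∧ PySem.Str.startswith tn2 "C" = true
    then ("C", 1) else ("", 0)
  | c :: cs =>
    let lcs := (c :: cs).getLast (List.cons_ne_nil c cs)   -- lcs_tn_components[-1]
    (lcs, pyGetDepth lcs)

-- ===== PORT B =====

-- for x, y in zip(p1, p2): if x != y: break; common.append(x)
def commonLeadingParts : List String → List String → List String
  | x :: xs, y :: ys => if x ≠ y then [] else x :: commonLeadingParts xs ys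
  | _, _ => []

def get_lcs_path_and_depth_alt (tn1 : String) (tn2 : String) : String × Int :=
  match commonLeadingParts (pySplitDot tn1) (pySplitDot tn2) with
  | [] =>
    if PySem.Str.startswith tn1 "C" = true ∧ PySem.Str.startswith tn2 "C" = true
    then ("C", 1) else ("", 0)
  | c :: cs =>
    let lcs := PySem.Str.join "." (c :: cs)
    (lcs, pyGetDepth lcs)

-- ===== PRECONDITION & SPEC =====
def Spec_get_lcs_path_and_depth (tn1 : String) (tn2 : String) (out : String × Int) : Prop := out = get_lcs_path_and_depth_alt tn1 tn2
instance (tn1 : String) (tn2 : String) (out : String × Int) : Decidable (Spec_get_lcs_path_and_depth tn1 tn2 out) := by unfold Spec_get_lcs_path_and_depth; infer_instance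

-- ===== CLAIM (what is proved, stated in full; the proofs are below) =====
def Claim_equal_get_lcs_path_and_depth : Prop := ∀ (tn1 : String) (tn2 : String), Dom_get_lcs_path_and_depth tn1 tn2 → Spec_get_lcs_path_and_depth tn1 tn2 (get_lcs_path_and_depth tn1 tn2)


-- ===== LEMMAS AND PROOFS =====

-- Simple structural model of s.split('.') on char lists
def splitCh (c : Char) : List Char → List (List Char)
  | [] => [[]]
  | a :: rest =>
    if a = c then [] :: splitCh c rest
    else
      match splitCh c rest with
      | [] => [[a]]
      | p :: ps => (a :: p) :: ps

theorem splitCh_ne_nil (c : Char) (l : List Char) : splitCh c l ≠ [] := by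
  cases l with
  | nil => simp [splitCh]
  | cons a rest =>
    simp only [splitCh]
    split_ifs with h
    · simp
    · cases hr : splitCh c rest <;> simp

theorem go_spec (c : Char) : ∀ (fuel : Nat) (l cur : List Char) (acc : List (List Char)),
    l.length ≤ fuel →
    PySem.Chars.splitOn.go [c] fuel l cur acc
      = acc.reverse ++ (splitCh c l).modifyHead (cur.reverse ++ ·) := by
  intro fuel
  induction fuel with
  | zero =>
    intro l cur acc h
    have hl : l = [] := by cases l <;> simp_all
    subst hl
    simp [PySem.Chars.splitOn.go, splitCh]
  | succ f ih =>
    intro l cur acc h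
    cases l with
    | nil => simp [PySem.Chars.splitOn.go, splitCh]
    | cons a rest =>
      rw [PySem.Chars.splitOn.go]
      by_cases hac : a = c
      · subst hac
        have hpre : [a].isPrefixOf (a :: rest) = true := by simp [List.isPrefixOf]
        rw [if_pos hpre]
        simp only [List.length_cons] at h
        rw [ih _ _ _ (by simpa using h)]
        simp only [splitCh, List.reverse_nil, List.reverse_cons, List.length_cons]
        cases hr : splitCh a rest <;> simp [List.modifyHead, hr]
      · have hpre : [c].isPrefixOf (a :: rest) = false := by
          simp [List.isPrefixOf]; exact fun h' => (hac h'.symm).elim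
        rw [if_neg (by simp [hpre])]
        simp only [List.length_cons] at h
        rw [ih _ _ _ (by omega)]
        simp only [splitCh, if_neg hac]
        cases hr : splitCh c rest with
        | nil => exact absurd hr (splitCh_ne_nil c rest)
        | cons p ps => simp [List.modifyHead]

theorem splitOn_eq (c : Char) (l : List Char) :
    PySem.Chars.splitOn l [c] = splitCh c l := by
  rw [PySem.Chars.splitOn, go_spec c (l.length + 1) l [] [] (by omega)]
  cases h : splitCh c l with
  | nil => exact absurd h (splitCh_ne_nil c l)
  | cons p ps => simp [List.modifyHead]

theorem mem_splitCh (c : Char) (l : List Char) : ∀ p ∈ splitCh c l, c ∉ p := by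
  induction l with
  | nil => intro p hp; simp [splitCh] at hp; simp [hp]
  | cons a rest ih =>
    by_cases h : a = c
    · simp only [splitCh, if_pos h]
      intro p hp
      rcases List.mem_cons.mp hp with rfl | hp
      · simp
      · exact ih p hp
    · simp only [splitCh, if_neg h]
      cases hr : splitCh c rest with
      | nil => exact absurd hr (splitCh_ne_nil c rest)
      | cons q qs =>
        intro p hp
        rcases List.mem_cons.mp hp with rfl | hp
        · intro hc
          rcases List.mem_cons.mp hc with hc | hc
          · exact h hc.symm
          · exact ih q (hr ▸ List.mem_cons_self) hc
        · exact ih p (hr ▸ List.mem_cons_of_mem _ hp)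

theorem intercalate_cons₂ (c : Char) (x y : List Char) (l : List (List Char)) :
    List.intercalate [c] (x :: y :: l) = x ++ c :: List.intercalate [c] (y :: l) := by
  simp [List.intercalate, List.intersperse]

theorem intercalate_one (c : Char) (x : List Char) :
    List.intercalate [c] [x] = x := by
  simp [List.intercalate, List.intersperse]

theorem intercalate_splitCh (c : Char) (l : List Char) :
    List.intercalate [c] (splitCh c l) = l := by
  induction l with
  | nil => simp [splitCh, intercalate_one]
  | cons a rest ih =>
    by_cases h : a = c
    · subst h
      rw [show splitCh a (a :: rest) = [] :: splitCh a rest by simp [splitCh]]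
      cases hr : splitCh a rest with
      | nil => exact absurd hr (splitCh_ne_nil a rest)
      | cons q qs =>
        rw [hr] at ih
        rw [intercalate_cons₂, ih]
        simp
    · simp only [splitCh, if_neg h]
      cases hr : splitCh c rest with
      | nil => exact absurd hr (splitCh_ne_nil c rest)
      | cons q qs =>
        rw [hr] at ih
        cases qs with
        | nil =>
          rw [intercalate_one] at ih
          rw [intercalate_one, ih]
        | cons w ws =>
          rw [intercalate_cons₂] at ih
          rw [intercalate_cons₂, List.cons_append, ih]

theorem intercalate_append₂ (c : Char) (l1 l2 : List (List Char)) (h1 : l1 ≠ []) (h2 : l2 ≠ []) :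
    List.intercalate [c] (l1 ++ l2)
      = List.intercalate [c] l1 ++ c :: List.intercalate [c] l2 := by
  induction l1 with
  | nil => exact absurd rfl h1
  | cons x xs ih =>
    cases xs with
    | nil =>
      cases l2 with
      | nil => exact absurd rfl h2
      | cons y ys => rw [List.singleton_append, intercalate_cons₂, intercalate_one]
    | cons x2 xs2 =>
      have ih' := ih (by simp)
      rw [List.cons_append] at ih'
      rw [List.cons_append, List.cons_append, intercalate_cons₂, ih', intercalate_cons₂]
      simp

-- char-level: tn starts with 'C' iff its first '.'-part does
theorem prefix_head (l : List Char) :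
    (['C'] <+: l) ↔ ['C'] <+: (splitCh '.' l).headI := by
  cases l with
  | nil => simp [splitCh]
  | cons a rest =>
    by_cases h : a = '.'
    · subst h
      simp [splitCh, List.cons_prefix_cons]
    · simp only [splitCh, if_neg h]
      cases hr : splitCh '.' rest with
      | nil => exact absurd hr (splitCh_ne_nil '.' rest)
      | cons p ps => simp [List.cons_prefix_cons]

-- ===== String-level abbreviations and facts =====

def jn (l : List String) : String := PySem.Str.join "." l

theorem toList_jn (l : List String) :
    (jn l).toList = List.intercalate ['.'] (l.map String.toList) := by
  have hdot : (".").toList = ['.'] := rfl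
  simp [jn, PySem.Str.join, PySem.Chars.join, hdot]

theorem jn_singleton (a : String) : jn [a] = a := by
  apply String.toList_inj.mp
  rw [toList_jn]; simp [intercalate_one]

theorem toList_jn_append (l1 l2 : List String) (h1 : l1 ≠ []) (h2 : l2 ≠ []) :
    (jn (l1 ++ l2)).toList = (jn l1).toList ++ '.' :: (jn l2).toList := by
  rw [toList_jn, toList_jn, toList_jn, List.map_append,
    intercalate_append₂ _ _ _ (by simpa using h1) (by simpa using h2)]

theorem jn_snoc_inj {cur : List String} {a b : String}
    (h : jn (cur ++ [a]) = jn (cur ++ [b])) : a = b := by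
  cases cur with
  | nil => simpa [jn_singleton] using h
  | cons x xs =>
    have h' := congrArg String.toList h
    rw [toList_jn_append _ _ (by simp) (by simp),
      toList_jn_append _ _ (by simp) (by simp)] at h'
    have h'' := List.append_cancel_left h'
    simp only [jn_singleton, List.cons.injEq] at h''
    exact String.toList_inj.mp h''.2

-- the ancestor chains built by A's join loop
def chain (cur : List String) : List String → List String
  | [] => []
  | p :: ps => jn (cur ++ [p]) :: chain (cur ++ [p]) ps

theorem build_eq : ∀ (parts : List String) (pre cur : List String),
    parts.foldl
      (fun (st : List String × List String) part =>
        let cur := st.2 ++ [part]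
        (st.1 ++ [PySem.Str.join "." cur], cur)) (pre, cur)
      = (pre ++ chain cur parts, cur ++ parts) := by
  intro parts
  induction parts with
  | nil => intro pre cur; simp [chain]
  | cons p ps ih =>
    intro pre cur
    simp only [List.foldl_cons]
    rw [ih]
    simp [chain, jn, List.append_assoc]

theorem chain_mem_struct : ∀ (ps cur : List String), ∀ x ∈ chain cur ps,
    ∃ q, q ≠ [] ∧ x = jn (cur ++ q) := by
  intro ps
  induction ps with
  | nil => intro cur x hx; simp [chain] at hx
  | cons p ps ih =>
    intro cur x hx
    rcases List.mem_cons.mp hx with rfl | hx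
    · exact ⟨[p], by simp, rfl⟩
    · obtain ⟨q, hq, rfl⟩ := ih (cur ++ [p]) x hx
      exact ⟨p :: q, by simp, by rw [List.append_assoc]; rfl⟩

theorem chain_len (ps cur : List String) (hc : cur ≠ []) :
    ∀ x ∈ chain cur ps, (jn cur).toList.length < x.toList.length := by
  intro x hx
  obtain ⟨q, hq, rfl⟩ := chain_mem_struct ps cur x hx
  rw [toList_jn_append _ _ hc hq]
  simp

theorem chain_nodup (ps : List String) : ∀ cur, (chain cur ps).Nodup := by
  induction ps with
  | nil => intro cur; simp [chain]
  | cons p ps ih =>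
    intro cur
    simp only [chain, List.nodup_cons]
    refine ⟨fun hmem => ?_, ih (cur ++ [p])⟩
    have := chain_len ps (cur ++ [p]) (by simp) _ hmem
    omega

theorem C_not_mem_chain (a : String) (ps : List String) : "C" ∉ chain [a] ps := by
  intro hmem
  obtain ⟨q, hq, hx⟩ := chain_mem_struct ps [a] _ hmem
  have h' := congrArg String.toList hx.symm
  rw [toList_jn_append _ _ (by simp) hq, jn_singleton] at h'
  have hC : ("C").toList = ['C'] := rfl
  rw [hC] at h'
  cases ha : a.toList with
  | nil => rw [ha] at h'; simp at h'
  | cons c0 cr => rw [ha] at h'; simp at h'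

theorem chain_getLast? : ∀ (ps cur : List String), ps ≠ [] →
    (chain cur ps).getLast? = some (jn (cur ++ ps)) := by
  intro ps
  induction ps with
  | nil => intro cur h; exact absurd rfl h
  | cons p ps ih =>
    intro cur _
    cases ps with
    | nil => simp [chain]
    | cons w ws =>
      rw [show chain cur (p :: w :: ws)
          = jn (cur ++ [p]) :: jn (cur ++ [p] ++ [w]) :: chain (cur ++ [p] ++ [w]) ws from rfl,
        List.getLast?_cons_cons,
        show jn (cur ++ [p] ++ [w]) :: chain (cur ++ [p] ++ [w]) ws
          = chain (cur ++ [p]) (w :: ws) from rfl,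
        ih (cur ++ [p]) (by simp)]
      simp

theorem foldl_dedup : ∀ (l u : List String), l.Nodup → (∀ x ∈ l, x ∉ u) →
    l.foldl (fun u p => if p ∈ u then u else u ++ [p]) u = u ++ l := by
  intro l
  induction l with
  | nil => intro u _ _; simp
  | cons a l ih =>
    intro u hnd hx
    simp only [List.foldl_cons]
    rw [if_neg (hx a List.mem_cons_self), ih (u ++ [a]) (List.Nodup.of_cons hnd) ?_]
    · simp
    · intro x hxl
      simp only [List.mem_append, List.mem_singleton]
      rintro (h | rfl)
      · exact hx x (List.mem_cons_of_mem _ hxl) h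
      · exact (List.nodup_cons.mp hnd).1 hxl

theorem lcs_nil_left (l : List String) : lcsComponents [] l = [] := by cases l <;> rfl
theorem lcs_nil_right (l : List String) : lcsComponents l [] = [] := by cases l <;> rfl
theorem common_nil_left (l : List String) : commonLeadingParts [] l = [] := by cases l <;> rfl
theorem common_nil_right (l : List String) : commonLeadingParts l [] = [] := by cases l <;> rfl

theorem lcs_chain : ∀ (p1 p2 cur : List String),
    lcsComponents (chain cur p1) (chain cur p2) = chain cur (commonLeadingParts p1 p2) := by
  intro p1
  induction p1 with
  | nil => intro p2 cur; rw [common_nil_left]; exact lcs_nil_left _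
  | cons a as ih =>
    intro p2 cur
    cases p2 with
    | nil => rw [common_nil_right]; exact lcs_nil_right _
    | cons b bs =>
      by_cases hab : a = b
      · subst hab
        show lcsComponents (jn (cur ++ [a]) :: chain (cur ++ [a]) as)
            (jn (cur ++ [a]) :: chain (cur ++ [a]) bs) = _
        simp only [lcsComponents]
        rw [if_pos trivial]
        rw [show commonLeadingParts (a :: as) (a :: bs) = a :: commonLeadingParts as bs by
          simp [commonLeadingParts]]
        rw [show chain cur (a :: commonLeadingParts as bs)
            = jn (cur ++ [a]) :: chain (cur ++ [a]) (commonLeadingParts as bs) from rfl]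
        rw [ih bs (cur ++ [a])]
      · show lcsComponents (jn (cur ++ [a]) :: chain (cur ++ [a]) as)
            (jn (cur ++ [b]) :: chain (cur ++ [b]) bs) = _
        simp only [lcsComponents]
        rw [if_neg (fun h => hab (jn_snoc_inj h))]
        rw [show commonLeadingParts (a :: as) (b :: bs) = [] by
          simp [commonLeadingParts, hab]]
        rfl

-- ===== facts about pySplitDot =====

theorem pySplitDot_eq (tn : String) :
    pySplitDot tn = (splitCh '.' tn.toList).map String.ofList := by
  rw [pySplitDot, splitOn_eq]

theorem pySplitDot_ne_nil (tn : String) : pySplitDot tn ≠ [] := by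
  rw [pySplitDot_eq]
  intro h
  exact splitCh_ne_nil '.' tn.toList (by simpa using h)

theorem toList_parts (tn : String) :
    (pySplitDot tn).map String.toList = splitCh '.' tn.toList := by
  rw [pySplitDot_eq, List.map_map]
  have h : String.toList ∘ String.ofList = id := by funext cs; simp
  rw [h, List.map_id]

theorem jn_parts (tn : String) : jn (pySplitDot tn) = tn := by
  apply String.toList_inj.mp
  rw [toList_jn, toList_parts, intercalate_splitCh]

theorem head_toList {tn a : String} {ps : List String}
    (hp : pySplitDot tn = a :: ps) : a.toList = (splitCh '.' tn.toList).headI := by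
  have h := toList_parts tn
  rw [hp] at h
  have := congrArg List.headI h
  simpa using this

theorem start_iff_head {tn a : String} {ps : List String}
    (hp : pySplitDot tn = a :: ps) :
    (PySem.Str.startswith tn "C" = true) ↔ ['C'] <+: a.toList := by
  have h1 : PySem.Str.startswith tn "C" = PySem.Chars.startswith tn.toList ['C'] := rfl
  rw [h1, PySem.Chars.startswith_iff, prefix_head, head_toList hp]

theorem dotfree_head {tn a : String} {ps : List String}
    (hp : pySplitDot tn = a :: ps) : '.' ∉ a.toList := by
  rw [head_toList hp]
  cases hs : splitCh '.' tn.toList with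
  | nil => exact absurd hs (splitCh_ne_nil _ _)
  | cons x xs =>
    simpa using mem_splitCh '.' tn.toList x (hs ▸ List.mem_cons_self)

theorem not_start_ne_C {tn a : String} {ps : List String}
    (hp : pySplitDot tn = a :: ps) (hs : ¬ PySem.Str.startswith tn "C" = true) :
    a ≠ "C" := by
  intro h
  exact hs ((start_iff_head hp).mpr (by rw [h]; exact List.prefix_refl _))

theorem chain_nil_cons (a : String) (ps : List String) :
    chain [] (a :: ps) = a :: chain [a] ps := by
  simp [chain, jn_singleton]

-- characterization of get_path_components on nonempty input
theorem path_char_root (tn : String) (h : tn ≠ "")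
    (r : PySem.Str.startswith tn "C" = true ∧ tn ≠ "C" ∧ (pySplitDot tn).headI ≠ "C") :
    get_path_components tn = "C" :: chain [] (pySplitDot tn) := by
  obtain ⟨a, ps, hp⟩ : ∃ a ps, pySplitDot tn = a :: ps := by
    cases hsp : pySplitDot tn with
    | nil => exact absurd hsp (pySplitDot_ne_nil tn)
    | cons x xs => exact ⟨x, xs, rfl⟩
  have ha : a ≠ "C" := by
    have := r.2.2; rw [hp] at this; simpa using this
  unfold get_path_components
  rw [if_neg h]
  simp only [build_eq, hp]
  rw [if_pos ⟨r.1, r.2.1⟩]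
  rw [chain_nil_cons]
  show List.foldl _ [] ("C" :: a :: chain [a] ps) = _
  simp only [List.foldl_cons]
  rw [if_neg (by simp [ha]), if_neg (by simp)]
  simp only [List.nil_append]
  rw [foldl_dedup _ _ (chain_nodup ps [a])
    (fun x hx => by
      have hne1 : x ≠ "C" := fun hxe => C_not_mem_chain _ _ (hxe ▸ hx)
      have hne2 : x ≠ a := by
        intro hxe
        subst hxe
        have := chain_len ps [x] (by simp) _ hx
        rw [jn_singleton] at this
        omega
      simp [hne1, hne2])]
  simp

theorem path_char_plain (tn : String) (h : tn ≠ "")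
    (r : ¬ (PySem.Str.startswith tn "C" = true ∧ tn ≠ "C" ∧ (pySplitDot tn).headI ≠ "C")) :
    get_path_components tn = chain [] (pySplitDot tn) := by
  obtain ⟨a, ps, hp⟩ : ∃ a ps, pySplitDot tn = a :: ps := by
    cases hsp : pySplitDot tn with
    | nil => exact absurd hsp (pySplitDot_ne_nil tn)
    | cons x xs => exact ⟨x, xs, rfl⟩
  unfold get_path_components
  rw [if_neg h]
  simp only [build_eq, hp]
  by_cases hC : PySem.Str.startswith tn "C" = true ∧ tn ≠ "C"
  · have haC : a = "C" := by
      by_contra hne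
      exact r ⟨hC.1, hC.2, by rw [hp]; simpa using hne⟩
    subst haC
    rw [if_pos hC, chain_nil_cons]
    simp only [List.singleton_append]
    rw [show List.foldl (fun u p => if p ∈ u then u else u ++ [p]) ([] : List String)
        ("C" :: "C" :: chain ["C"] ps)
        = List.foldl (fun u p => if p ∈ u then u else u ++ [p]) ["C"] (chain ["C"] ps) by simp]
    rw [foldl_dedup _ _ (chain_nodup ps ["C"])
      (fun x hx => by
        have hne : x ≠ "C" := fun hxe => C_not_mem_chain _ _ (hxe ▸ hx)
        simp [hne])]
    simp
  · rw [if_neg hC]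
    simp only [List.nil_append]
    rw [foldl_dedup _ _ (chain_nodup _ []) (by simp)]
    simp

-- ===== reductions of the two entry functions =====

theorem A_nil {tn1 tn2 : String}
    (h : lcsComponents (get_path_components tn1) (get_path_components tn2) = []) :
    get_lcs_path_and_depth tn1 tn2 =
      if PySem.Str.startswith tn1 "C" = true ∧ PySem.Str.startswith tn2 "C" = true
      then ("C", 1) else ("", 0) := by
  simp only [get_lcs_path_and_depth]
  rw [h]

theorem A_cons {tn1 tn2 : String} {c : String} {cs : List String}
    (h : lcsComponents (get_path_components tn1) (get_path_components tn2) = c :: cs) :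
    get_lcs_path_and_depth tn1 tn2 =
      ((c :: cs).getLast (List.cons_ne_nil c cs),
        pyGetDepth ((c :: cs).getLast (List.cons_ne_nil c cs))) := by
  simp only [get_lcs_path_and_depth]
  rw [h]

theorem B_nil {tn1 tn2 : String}
    (h : commonLeadingParts (pySplitDot tn1) (pySplitDot tn2) = []) :
    get_lcs_path_and_depth_alt tn1 tn2 =
      if PySem.Str.startswith tn1 "C" = true ∧ PySem.Str.startswith tn2 "C" = true
      then ("C", 1) else ("", 0) := by
  simp only [get_lcs_path_and_depth_alt]
  rw [h]

theorem B_cons {tn1 tn2 : String} {c : String} {cs : List String}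
    (h : commonLeadingParts (pySplitDot tn1) (pySplitDot tn2) = c :: cs) :
    get_lcs_path_and_depth_alt tn1 tn2 = (jn (c :: cs), pyGetDepth (jn (c :: cs))) := by
  simp only [get_lcs_path_and_depth_alt]
  rw [h]
  rfl

theorem chain_getLast {cur ps : List String} (h : ps ≠ []) (c : String) (cs : List String)
    (he : chain cur ps = c :: cs) :
    (c :: cs).getLast (List.cons_ne_nil c cs) = jn (cur ++ ps) := by
  have h2 := chain_getLast? ps cur h
  rw [he] at h2
  have h3 := List.getLast?_eq_some_getLast (l := c :: cs) (List.cons_ne_nil c cs)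
  exact Option.some.inj (h3.symm.trans h2)

-- symmetry of both entry points (used to reduce the mirrored mixed case)
theorem lcs_comm : ∀ (l1 l2 : List String), lcsComponents l1 l2 = lcsComponents l2 l1 := by
  intro l1
  induction l1 with
  | nil => intro l2; rw [lcs_nil_left, lcs_nil_right]
  | cons a as ih =>
    intro l2
    cases l2 with
    | nil => rw [lcs_nil_left, lcs_nil_right]
    | cons b bs =>
      simp only [lcsComponents]
      by_cases hab : a = b
      · subst hab; rw [if_pos rfl, if_pos rfl, ih]
      · rw [if_neg hab, if_neg (Ne.symm hab)]

theorem common_comm : ∀ (l1 l2 : List String), commonLeadingParts l1 l2 = commonLeadingParts l2 l1 := by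
  intro l1
  induction l1 with
  | nil => intro l2; rw [common_nil_left, common_nil_right]
  | cons a as ih =>
    intro l2
    cases l2 with
    | nil => rw [common_nil_left, common_nil_right]
    | cons b bs =>
      simp only [commonLeadingParts]
      by_cases hab : a = b
      · subst hab; simp [ih]
      · simp [hab, Ne.symm hab]

theorem A_comm (tn1 tn2 : String) :
    get_lcs_path_and_depth tn1 tn2 = get_lcs_path_and_depth tn2 tn1 := by
  simp only [get_lcs_path_and_depth]
  rw [lcs_comm]
  cases h : lcsComponents (get_path_components tn2) (get_path_components tn1) with
  | nil => exact if_congr and_comm rfl rfl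
  | cons c cs => rfl

theorem B_comm (tn1 tn2 : String) :
    get_lcs_path_and_depth_alt tn1 tn2 = get_lcs_path_and_depth_alt tn2 tn1 := by
  simp only [get_lcs_path_and_depth_alt]
  rw [common_comm]
  cases h : commonLeadingParts (pySplitDot tn2) (pySplitDot tn1) with
  | nil => exact if_congr and_comm rfl rfl
  | cons c cs => rfl

-- small computed facts
theorem start_CC : PySem.Str.startswith "C" "C" = true := by decide
theorem depth_C : pyGetDepth "C" = 1 := by decide
theorem depth_empty : pyGetDepth "" = 0 := by decide
theorem split_C : pySplitDot "C" = ["C"] := by decide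

theorem empty_left (tn2 : String) :
    get_lcs_path_and_depth "" tn2 = get_lcs_path_and_depth_alt "" tn2 := by
  have hpath : get_path_components "" = [] := by
    unfold get_path_components; rw [if_pos rfl]
  have hA : get_lcs_path_and_depth "" tn2 = ("", 0) := by
    rw [A_nil (by rw [hpath, lcs_nil_left]),
      if_neg (fun hc => absurd hc.1 (by decide))]
  have hsplit : pySplitDot "" = [""] := by decide
  cases hsp2 : pySplitDot tn2 with
  | nil => exact absurd hsp2 (pySplitDot_ne_nil tn2)
  | cons b bs =>
    by_cases hb : ("" : String) = b
    · subst hb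
      have hk : commonLeadingParts (pySplitDot "") (pySplitDot tn2) = [""] := by
        rw [hsplit, hsp2]
        simp only [commonLeadingParts]
        rw [if_neg (by simp)]
      rw [hA, B_cons hk, jn_singleton, depth_empty]
    · have hk : commonLeadingParts (pySplitDot "") (pySplitDot tn2) = [] := by
        rw [hsplit, hsp2]
        simp only [commonLeadingParts]
        rw [if_pos hb]
      rw [hA, B_nil hk, if_neg (fun hc => absurd hc.1 (by decide))]

theorem gamma (tn1 tn2 : String) (h1 : tn1 ≠ "") (h2 : tn2 ≠ "")
    (r1 : PySem.Str.startswith tn1 "C" = true ∧ tn1 ≠ "C" ∧ (pySplitDot tn1).headI ≠ "C")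
    (r2 : ¬ (PySem.Str.startswith tn2 "C" = true ∧ tn2 ≠ "C" ∧ (pySplitDot tn2).headI ≠ "C")) :
    get_lcs_path_and_depth tn1 tn2 = get_lcs_path_and_depth_alt tn1 tn2 := by
  obtain ⟨a1, ps1, hp1⟩ : ∃ a ps, pySplitDot tn1 = a :: ps := by
    cases hsp : pySplitDot tn1 with
    | nil => exact absurd hsp (pySplitDot_ne_nil tn1)
    | cons x xs => exact ⟨x, xs, rfl⟩
  obtain ⟨a2, ps2, hp2⟩ : ∃ a ps, pySplitDot tn2 = a :: ps := by
    cases hsp : pySplitDot tn2 with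
    | nil => exact absurd hsp (pySplitDot_ne_nil tn2)
    | cons x xs => exact ⟨x, xs, rfl⟩
  have ha1 : a1 ≠ "C" := by
    have := r1.2.2; rw [hp1] at this; simpa using this
  have hs1 := r1.1
  have hpath1 : get_path_components tn1 = "C" :: chain [] (pySplitDot tn1) :=
    path_char_root tn1 h1 r1
  by_cases hs2 : PySem.Str.startswith tn2 "C" = true
  · by_cases htn2 : tn2 = "C"
    · -- tn2 = "C": both return ("C", 1)
      subst htn2
      have hA : lcsComponents (get_path_components tn1) (get_path_components "C") = ["C"] := by
        rw [hpath1, path_char_plain "C" h2 (fun hc => hc.2.1 rfl), split_C]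
        rw [show chain [] ["C"] = ["C"] by simp [chain, jn_singleton]]
        simp only [lcsComponents]
        rw [if_pos trivial, lcs_nil_right]
      have hk : commonLeadingParts (pySplitDot tn1) (pySplitDot "C") = [] := by
        rw [hp1, split_C]
        simp only [commonLeadingParts]
        rw [if_pos (by simpa using ha1)]
      rw [A_cons hA, B_nil hk, if_pos ⟨hs1, start_CC⟩]
      simp [depth_C]
    · -- tn2 ≠ "C" but starts with 'C' and its first part is "C"
      have ha2 : a2 = "C" := by
        by_contra hne
        exact r2 ⟨hs2, htn2, by rw [hp2]; simpa using hne⟩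
      subst ha2
      have hps2 : ps2 ≠ [] := by
        intro hnil
        apply htn2
        have hj := jn_parts tn2
        rw [hp2, hnil, jn_singleton] at hj
        exact hj.symm
      obtain ⟨b, bs, rfl⟩ : ∃ b bs, ps2 = b :: bs := by
        cases ps2 with
        | nil => exact absurd rfl hps2
        | cons b bs => exact ⟨b, bs, rfl⟩
      have hpath2 : get_path_components tn2 = chain [] (pySplitDot tn2) :=
        path_char_plain tn2 h2 r2
      have hdot : '.' ∈ (jn (["C"] ++ [b])).toList := by
        rw [toList_jn_append ["C"] [b] (by simp) (by simp), jn_singleton]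
        simp
      have hne_head : a1 ≠ jn (["C"] ++ [b]) := fun he => (dotfree_head hp1) (he ▸ hdot)
      have e1 : chain ["C"] (b :: bs) = jn (["C"] ++ [b]) :: chain (["C"] ++ [b]) bs := rfl
      have hA : lcsComponents (get_path_components tn1) (get_path_components tn2) = ["C"] := by
        rw [hpath1, hpath2, hp1, hp2, chain_nil_cons, chain_nil_cons, e1]
        simp only [lcsComponents]
        rw [if_pos trivial, if_neg hne_head]
      have hk : commonLeadingParts (pySplitDot tn1) (pySplitDot tn2) = [] := by
        rw [hp1, hp2]
        simp only [commonLeadingParts]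
        rw [if_pos (by simpa using ha1)]
      rw [A_cons hA, B_nil hk, if_pos ⟨hs1, hs2⟩]
      simp [depth_C]
  · -- tn2 does not start with 'C': both return ("", 0)
    have ha2C : a2 ≠ "C" := not_start_ne_C hp2 hs2
    have hpath2 : get_path_components tn2 = chain [] (pySplitDot tn2) :=
      path_char_plain tn2 h2 (fun hc => hs2 hc.1)
    have hA : lcsComponents (get_path_components tn1) (get_path_components tn2) = [] := by
      rw [hpath1, hpath2, hp2, chain_nil_cons]
      simp only [lcsComponents]
      rw [if_neg (Ne.symm ha2C)]
    have ha1a2 : a1 ≠ a2 := by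
      intro he
      apply hs2
      rw [start_iff_head hp2, ← he]
      exact (start_iff_head hp1).mp hs1
    have hk : commonLeadingParts (pySplitDot tn1) (pySplitDot tn2) = [] := by
      rw [hp1, hp2]
      simp only [commonLeadingParts]
      rw [if_pos ha1a2]
    rw [A_nil hA, B_nil hk]

theorem main_eq (tn1 tn2 : String) :
    get_lcs_path_and_depth tn1 tn2 = get_lcs_path_and_depth_alt tn1 tn2 := by
  by_cases h1 : tn1 = ""
  · subst h1; exact empty_left tn2
  by_cases h2 : tn2 = ""
  · subst h2; rw [A_comm, B_comm]; exact empty_left tn1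
  by_cases r1 : (PySem.Str.startswith tn1 "C" = true ∧ tn1 ≠ "C" ∧ (pySplitDot tn1).headI ≠ "C")
  · by_cases r2 : (PySem.Str.startswith tn2 "C" = true ∧ tn2 ≠ "C" ∧ (pySplitDot tn2).headI ≠ "C")
    · -- both paths carry the prepended root 'C'
      have hpath1 : get_path_components tn1 = "C" :: chain [] (pySplitDot tn1) :=
        path_char_root tn1 h1 r1
      have hpath2 : get_path_components tn2 = "C" :: chain [] (pySplitDot tn2) :=
        path_char_root tn2 h2 r2
      cases hk : commonLeadingParts (pySplitDot tn1) (pySplitDot tn2) with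
      | nil =>
        have hA : lcsComponents (get_path_components tn1) (get_path_components tn2) = ["C"] := by
          rw [hpath1, hpath2]
          simp only [lcsComponents]
          rw [if_pos trivial, lcs_chain, hk]
          rfl
        rw [A_cons hA, B_nil hk, if_pos ⟨r1.1, r2.1⟩]
        simp [depth_C]
      | cons c cs =>
        have hcc : chain [] (c :: cs) = c :: chain [c] cs := chain_nil_cons c cs
        have hA : lcsComponents (get_path_components tn1) (get_path_components tn2)
            = "C" :: c :: chain [c] cs := by
          rw [hpath1, hpath2]
          simp only [lcsComponents]
          rw [if_pos trivial, lcs_chain, hk, hcc]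
        rw [A_cons hA, B_cons hk]
        have hl : ("C" :: c :: chain [c] cs).getLast
            (List.cons_ne_nil "C" (c :: chain [c] cs)) = jn (c :: cs) := by
          rw [List.getLast_cons (by simp : c :: chain [c] cs ≠ [])]
          have := chain_getLast (cur := []) (ps := c :: cs) (by simp) c (chain [c] cs) hcc
          simpa using this
        rw [hl]
    · exact gamma tn1 tn2 h1 h2 r1 r2
  · by_cases r2 : (PySem.Str.startswith tn2 "C" = true ∧ tn2 ≠ "C" ∧ (pySplitDot tn2).headI ≠ "C")
    · rw [A_comm, B_comm]; exact gamma tn2 tn1 h2 h1 r2 r1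
    · -- neither path is rooted
      have hpath1 : get_path_components tn1 = chain [] (pySplitDot tn1) :=
        path_char_plain tn1 h1 r1
      have hpath2 : get_path_components tn2 = chain [] (pySplitDot tn2) :=
        path_char_plain tn2 h2 r2
      cases hk : commonLeadingParts (pySplitDot tn1) (pySplitDot tn2) with
      | nil =>
        have hA : lcsComponents (get_path_components tn1) (get_path_components tn2) = [] := by
          rw [hpath1, hpath2, lcs_chain, hk]
          rfl
        rw [A_nil hA, B_nil hk]
      | cons c cs =>
        have hcc : chain [] (c :: cs) = c :: chain [c] cs := chain_nil_cons c cs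
        have hA : lcsComponents (get_path_components tn1) (get_path_components tn2)
            = c :: chain [c] cs := by
          rw [hpath1, hpath2, lcs_chain, hk, hcc]
        rw [A_cons hA, B_cons hk]
        have hl : (c :: chain [c] cs).getLast (List.cons_ne_nil c (chain [c] cs))
            = jn (c :: cs) := by
          have := chain_getLast (cur := []) (ps := c :: cs) (by simp) c (chain [c] cs) hcc
          simpa using this
        rw [hl]

-- ===== VERDICT (by name: the statement is the Claim_ definition above) =====
theorem get_lcs_path_and_depth_spec : Claim_equal_get_lcs_path_and_depth := by
  intro tn1 tn2 _
  unfold Spec_get_lcs_path_and_depth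
  exact main_eq tn1 tn2
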